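-- pv_equiv track=rewrite | github.com/astral-sh/ecosystem-analyzer | diagnostics-diff.py | _group_diagnostics_by_file
-- ===== SOURCE A (Python) =====
-- from typing import Dict, List, Any, Optional, Tuple
--
-- def _group_diagnostics_by_file(
--     diagnostics: List[Dict[str, Any]]
-- ) -> Dict[str, List[Dict[str, Any]]]:
--     """Group diagnostics by file path."""
--     result = {}
--     for diag in diagnostics:
--         path = diag["path"]
--         if path not in result:
--             result[path] = []
--         result[path].append(diag)
--     return result
-- ===== SOURCE B (Python) =====
-- def _group_diagnostics_by_file(diagnostics):
--     """Group diagnostics by file path.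
--
--     Two-pass alternative: collect the distinct paths in first-occurrence order,
--     then build each group with one filter pass per path.
--     """
--     order = list(dict.fromkeys(d["path"] for d in diagnostics))
--     return {p: [d for d in diagnostics if d["path"] == p] for p in order}
-- ===== Notes on version B (the rewrite author's own statement) =====
-- stated objective: alternative
-- what changed: Replaces the incremental dict-of-lists accumulation with a two-pass scheme: an ordered dedup of the paths followed by one filter pass per distinct path (a dict comprehension), with no mutable accumulator; Pre_ excludes only inputs where some diagnostic lacks the 'path' key, on which both A and B raise KeyError.
import Mathlib
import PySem

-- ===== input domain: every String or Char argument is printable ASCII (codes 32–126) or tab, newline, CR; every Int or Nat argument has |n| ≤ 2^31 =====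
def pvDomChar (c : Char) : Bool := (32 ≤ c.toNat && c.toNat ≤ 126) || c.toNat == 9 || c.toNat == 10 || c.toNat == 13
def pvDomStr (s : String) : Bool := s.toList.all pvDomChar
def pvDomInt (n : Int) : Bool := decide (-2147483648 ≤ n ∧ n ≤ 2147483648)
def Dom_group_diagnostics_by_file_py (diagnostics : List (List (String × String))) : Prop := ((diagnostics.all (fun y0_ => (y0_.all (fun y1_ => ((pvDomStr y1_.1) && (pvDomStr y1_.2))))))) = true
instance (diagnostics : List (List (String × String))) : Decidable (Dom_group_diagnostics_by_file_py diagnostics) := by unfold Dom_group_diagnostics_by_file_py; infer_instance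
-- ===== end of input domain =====

-- B groups by an ordered dedup of the paths plus one filter pass per path instead of A's
-- incremental dict-of-lists accumulation (alternative decomposition; return value only).

-- diag["path"] (Pre_ guarantees the key is present, so the default is never read)
def pvDiagPath (diag : List (String × String)) : String :=
  (PySem.Dict.mk diag).getD "path" ""

-- ===== PORT A =====
def group_diagnostics_by_file_py (diagnostics : List (List (String × String))) : List (String × List (List (String × String))) :=
  (diagnostics.foldl
    (fun result diag =>
      let path := pvDiagPath diag
      let result := if result.contains path then result else result.insert path []
      result.modify path [] (fun l => l ++ [diag]))
    PySem.Dict.empty).items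

-- ===== PORT B =====
def group_diagnostics_by_file_py_alt (diagnostics : List (List (String × String))) : List (String × List (List (String × String))) :=
  let order := PySem.List.dedup (diagnostics.map pvDiagPath)
  order.map (fun p => (p, diagnostics.filter (fun d => pvDiagPath d == p)))

-- ===== PRECONDITION & SPEC =====
-- Pre_ excludes exactly the inputs where some diagnostic lacks the "path" key: there Python A raises KeyError.
def Pre_group_diagnostics_by_file_py (diagnostics : List (List (String × String))) : Prop :=
  (diagnostics.all (fun diag => (PySem.Dict.mk diag).contains "path")) = true
instance (diagnostics : List (List (String × String))) : Decidable (Pre_group_diagnostics_by_file_py diagnostics) := by unfold Pre_group_diagnostics_by_file_py; infer_instance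

def pvWitness_group_diagnostics_by_file_py : (List (List (String × String))) :=
  [[("path", "a.py"), ("message", "err")], [("path", "b.py"), ("message", "warn")], [("path", "a.py"), ("message", "note")]]

def Spec_group_diagnostics_by_file_py (diagnostics : List (List (String × String))) (out : List (String × List (List (String × String)))) : Prop := out = group_diagnostics_by_file_py_alt diagnostics
instance (diagnostics : List (List (String × String))) (out : List (String × List (List (String × String)))) : Decidable (Spec_group_diagnostics_by_file_py diagnostics out) := by unfold Spec_group_diagnostics_by_file_py; infer_instance

-- ===== CLAIM (what is proved, stated in full; the proofs are below) =====
def Claim_equal_group_diagnostics_by_file_py : Prop := ∀ (diagnostics : List (List (String × String))), Dom_group_diagnostics_by_file_py diagnostics → Pre_group_diagnostics_by_file_py diagnostics → Spec_group_diagnostics_by_file_py diagnostics (group_diagnostics_by_file_py diagnostics)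

-- ===== LEMMAS AND PROOFS =====

-- A's loop body ('create the empty slot if missing, then append') is one modify-with-default.
theorem pv_step_eq (d : PySem.Dict String (List (List (String × String)))) (x : List (String × String)) :
    ((if d.contains (pvDiagPath x) then d else d.insert (pvDiagPath x) []).modify (pvDiagPath x) [] (fun l => l ++ [x]))
      = d.modify (pvDiagPath x) [] (fun l => l ++ [x]) := by
  by_cases h : d.contains (pvDiagPath x) = true
  · simp [h]
  · simp only [Bool.not_eq_true] at h
    simp [h, PySem.Dict.modify, PySem.Dict.insert_insert_self, PySem.Dict.getD_insert_self,
      PySem.Dict.getD_of_not_contains _ _ h]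

theorem pv_foldl_eq (diagnostics : List (List (String × String))) :
    diagnostics.foldl
      (fun result diag =>
        let path := pvDiagPath diag
        let result := if result.contains path then result else result.insert path []
        result.modify path [] (fun l => l ++ [diag]))
      PySem.Dict.empty
    = diagnostics.foldl (fun d x => d.modify (pvDiagPath x) [] (fun l => l ++ [x])) PySem.Dict.empty := by
  apply List.foldl_ext
  intro d x _
  exact pv_step_eq d x

theorem group_diagnostics_by_file_py_spec : Claim_equal_group_diagnostics_by_file_py := by
  intro diagnostics _ _
  unfold Spec_group_diagnostics_by_file_py group_diagnostics_by_file_py group_diagnostics_by_file_py_alt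
  rw [pv_foldl_eq]
  set D := diagnostics.foldl (fun d x => d.modify (pvDiagPath x) [] (fun l => l ++ [x])) PySem.Dict.empty with hD
  have hkeys : D.keys = PySem.List.dedup (diagnostics.map pvDiagPath) := by
    rw [hD, PySem.Dict.keys_foldl_modify_key]
    simp [PySem.Set.update_nil_left]
  have hnodup : D.keys.Nodup := by
    rw [hD]
    exact PySem.Dict.nodup_keys_foldl_modify_key _ _ _ _ _ PySem.Dict.nodup_keys_empty
  have hgetD : ∀ c, D.getD c [] = diagnostics.filter (fun d => pvDiagPath d == c) := by
    intro c
    have hfold : D = (diagnostics.map (fun x => (pvDiagPath x, x))).foldl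
        (fun d p => d.modify p.1 [] (fun l => l ++ [p.2])) PySem.Dict.empty := by
      rw [hD, List.foldl_map]
    rw [hfold, PySem.Dict.getD_foldl_modify_append]
    simp [List.filter_map, List.map_map, Function.comp_def]
  rw [PySem.Dict.items_eq_map_keys D hnodup [], hkeys]
  apply List.map_congr_left
  intro p _
  rw [hgetD p]
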